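-- pv_equiv track=rewrite | github.com/WiebkeFr/Process-Mining-Praktikum | webservice/src/alpha_algorithm.py | reduce_maximal_pairs
-- ===== SOURCE A (Python) =====
-- def reduce_maximal_pairs(maximal_pairs):
--     """
--     Reduces the maximal pairs. If a pair is included in another one, the shorter pair is removed.
--     Example: (A -> (B, C)) and (A -> B) ==> (A -> (B, C))
--
--     Args:
--         maximal_pairs (Array of Tupels): An array of tuples showing the maximal pairs
--
--     Returns:
--         reduced_array (Array of Tupels): Each Tupel contains two arrays of activities.
--     """
--     reduced_array = []
--     for pair in maximal_pairs:
--         if len(list(filter(lambda reduced_pair: set(pair[0]).issubset(reduced_pair[0]) and set(pair[1]).issubset(reduced_pair[1]), reduced_array))) > 0: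
--                 continue
--         elif len(list(filter(lambda reduced_pair: set(reduced_pair[0]).issubset(pair[0]) and set(reduced_pair[1]).issubset(pair[1]), reduced_array))) > 0:
--             pairs_to_be_removed = list(filter(lambda reduced_pair: set(reduced_pair[0]).issubset(pair[0]) and set(reduced_pair[1]).issubset(pair[1]), reduced_array))
--             for pair_to_be_removed in pairs_to_be_removed:
--                 reduced_array.remove(pair_to_be_removed)
--             reduced_array.append(pair)
--         else:
--             reduced_array.append(pair)
--     return reduced_array
-- ===== SOURCE B (Python) =====
-- def reduce_maximal_pairs(maximal_pairs):
--     """Pure filter: keep a pair iff no other pair strictly dominates it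
--     (componentwise set-inclusion) and no earlier pair is set-equal to it."""
--     def le(p, q):
--         return set(p[0]).issubset(q[0]) and set(p[1]).issubset(q[1])
--     out = []
--     for i, p in enumerate(maximal_pairs):
--         if any(le(p, q) and not le(q, p) for q in maximal_pairs):
--             continue
--         if any(le(p, q) and le(q, p) for q in maximal_pairs[:i]):
--             continue
--         out.append(p)
--     return out
-- ===== Notes on version B (the rewrite author's own statement) =====
-- stated objective: simpler
-- what changed: A maintains a mutable accumulator, skipping dominated pairs and removing-then-reappending dominated entries; B is a pure double scan that keeps a pair iff no other pair strictly dominates it (componentwise set-inclusion) and no earlier pair is set-equal, with no list mutation.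
import Mathlib
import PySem

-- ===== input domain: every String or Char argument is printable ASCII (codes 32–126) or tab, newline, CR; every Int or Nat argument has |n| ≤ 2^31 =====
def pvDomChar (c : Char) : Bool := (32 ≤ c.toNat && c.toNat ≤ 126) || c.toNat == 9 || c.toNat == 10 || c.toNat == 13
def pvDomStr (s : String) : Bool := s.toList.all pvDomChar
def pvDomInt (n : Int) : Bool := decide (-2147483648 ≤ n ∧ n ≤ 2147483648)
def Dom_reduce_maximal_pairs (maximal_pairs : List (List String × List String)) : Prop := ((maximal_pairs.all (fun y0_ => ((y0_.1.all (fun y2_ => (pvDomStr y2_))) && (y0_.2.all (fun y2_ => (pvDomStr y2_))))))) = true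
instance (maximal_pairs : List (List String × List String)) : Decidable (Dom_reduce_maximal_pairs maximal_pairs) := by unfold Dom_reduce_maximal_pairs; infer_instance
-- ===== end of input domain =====

-- B keeps a pair iff no other pair strictly dominates it and no earlier pair is set-equal,
-- a pure double scan instead of A's mutable remove-and-reappend accumulator; same result, similar cost.

-- ===== PORT A =====
-- set(a).issubset(b)
def pySubA (a b : List String) : Bool := PySem.Set.issubset (PySem.Set.ofList a) b

-- the body of A's loop over 'pair', acting on 'reduced_array'
def stepA (reduced_array : List (List String × List String)) (pair : List String × List String) :
    List (List String × List String) :=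
  if 0 < (reduced_array.filter (fun r => pySubA pair.1 r.1 && pySubA pair.2 r.2)).length then
    reduced_array
  else if 0 < (reduced_array.filter (fun r => pySubA r.1 pair.1 && pySubA r.2 pair.2)).length then
    let pairs_to_be_removed := reduced_array.filter (fun r => pySubA r.1 pair.1 && pySubA r.2 pair.2)
    (pairs_to_be_removed.foldl (fun a r => (PySem.List.remove? a r).getD a) reduced_array) ++ [pair]
  else
    reduced_array ++ [pair]

def reduce_maximal_pairs (maximal_pairs : List (List String × List String)) : List (List String × List String) :=
  maximal_pairs.foldl stepA []

-- ===== PORT B =====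
-- le(p, q) = set(p[0]).issubset(q[0]) and set(p[1]).issubset(q[1])
def pyLeAlt (p q : List String × List String) : Bool :=
  PySem.Set.issubset (PySem.Set.ofList p.1) q.1 && PySem.Set.issubset (PySem.Set.ofList p.2) q.2

def reduce_maximal_pairs_alt (maximal_pairs : List (List String × List String)) : List (List String × List String) :=
  (PySem.List.enumerate maximal_pairs).foldl
    (fun out ip =>
      if maximal_pairs.any (fun q => pyLeAlt ip.2 q && !(pyLeAlt q ip.2)) then out
      else if (PySem.List.slice maximal_pairs none (some ip.1)).any
                (fun q => pyLeAlt ip.2 q && pyLeAlt q ip.2) then out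
      else out ++ [ip.2]) []

-- ===== PRECONDITION & SPEC =====
def Spec_reduce_maximal_pairs (maximal_pairs : List (List String × List String)) (out : List (List String × List String)) : Prop := out = reduce_maximal_pairs_alt maximal_pairs
instance (maximal_pairs : List (List String × List String)) (out : List (List String × List String)) : Decidable (Spec_reduce_maximal_pairs maximal_pairs out) := by unfold Spec_reduce_maximal_pairs; infer_instance

-- ===== CLAIM (what is proved, stated in full; the proofs are below) =====
def Claim_equal_reduce_maximal_pairs : Prop := ∀ (maximal_pairs : List (List String × List String)), Dom_reduce_maximal_pairs maximal_pairs → Spec_reduce_maximal_pairs maximal_pairs (reduce_maximal_pairs maximal_pairs)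

-- ===== LEMMAS AND PROOFS =====

-- abbreviation for the pair type
abbrev PVP := List String × List String

-- keepCond mp i p : p (at position i of mp) survives B's two tests
def keepCond (mp : List PVP) (i : Nat) (p : PVP) : Bool :=
  !(mp.any (fun q => pyLeAlt p q && !(pyLeAlt q p))) &&
  !((mp.take i).any (fun q => pyLeAlt p q && pyLeAlt q p))

-- the common normal form: B's output as a filterMap over indexed pairs
def Ksel (mp : List PVP) : List PVP :=
  mp.zipIdx.filterMap (fun pi => if keepCond mp pi.2 pi.1 then some pi.1 else none)

theorem pyLe_refl (p : PVP) : pyLeAlt p p = true := by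
  simp [pyLeAlt, PySem.Set.issubset_iff, PySem.Set.mem_ofList]

theorem pyLe_trans {a b c : PVP} (h1 : pyLeAlt a b = true) (h2 : pyLeAlt b c = true) :
    pyLeAlt a c = true := by
  simp only [pyLeAlt, PySem.Set.issubset_iff, PySem.Set.mem_ofList, Bool.and_eq_true] at *
  exact ⟨fun x hx => h2.1 x (h1.1 x hx), fun x hx => h2.2 x (h1.2 x hx)⟩

theorem pySub_eq_le (p r : PVP) : (pySubA p.1 r.1 && pySubA p.2 r.2) = pyLeAlt p r := rfl

-- membership facts about Ksel
theorem mem_Ksel {mp : List PVP} {x : PVP} (h : x ∈ Ksel mp) :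
    x ∈ mp ∧ ∀ q ∈ mp, ¬(pyLeAlt x q = true ∧ pyLeAlt q x = false) := by
  simp only [Ksel, List.mem_filterMap] at h
  obtain ⟨⟨p, i⟩, hmem, hsome⟩ := h
  by_cases hc : keepCond mp i p = true
  · simp [hc] at hsome
    subst hsome
    obtain ⟨_, _, hx⟩ := List.mem_zipIdx hmem
    constructor
    · rw [hx]; exact List.getElem_mem _
    · intro q hq ⟨h1, h2⟩
      simp only [keepCond, Bool.and_eq_true, Bool.not_eq_true', List.any_eq_false] at hc
      have := hc.1 q hq
      simp [h1, h2] at this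
  · simp [hc] at hsome

-- Good: A's accumulator equals Ksel, every seen pair is dominated by a kept one,
-- and kept pairs are pairwise non-set-equal
def GoodInv (l : List PVP) : Prop :=
  (List.foldl stepA [] l = Ksel l) ∧
  (∀ x ∈ l, ∃ k ∈ Ksel l, pyLeAlt x k = true) ∧
  List.Pairwise (fun a b => ¬(pyLeAlt a b = true ∧ pyLeAlt b a = true)) (Ksel l)

theorem nodup_of_pairwise {l : List PVP}
    (h : List.Pairwise (fun a b => ¬(pyLeAlt a b = true ∧ pyLeAlt b a = true)) l) : l.Nodup := by
  refine h.imp ?_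
  intro a b hab hEq
  exact hab (by rw [hEq]; exact ⟨pyLe_refl b, pyLe_refl b⟩)

-- removing (first occurrences of) each element of filter c l from a Nodup l leaves filter (!c) l
theorem foldl_remove_cons {t : List PVP} {x : PVP} (rl : List PVP) (hx : ∀ y ∈ rl, y ≠ x) :
    rl.foldl (fun a r => (PySem.List.remove? a r).getD a) (x :: t)
      = x :: rl.foldl (fun a r => (PySem.List.remove? a r).getD a) t := by
  induction rl generalizing t with
  | nil => rfl
  | cons y ys ih =>
    have hyx : x ≠ y := fun h => hx y (List.mem_cons_self) h.symm
    have htail : ∀ z ∈ ys, z ≠ x := fun z hz => hx z (List.mem_cons_of_mem _ hz)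
    simp only [List.foldl_cons]
    rw [PySem.List.remove?_cons_of_ne _ hyx]
    cases hrem : PySem.List.remove? t y with
    | none => simp only [Option.map_none, Option.getD_none]; exact ih htail
    | some u => simp only [Option.map_some, Option.getD_some]; exact ih htail

theorem foldl_remove_filter (c : PVP → Bool) :
    ∀ (l : List PVP), l.Nodup →
    (l.filter c).foldl (fun a r => (PySem.List.remove? a r).getD a) l = l.filter (fun x => !(c x))
  | [], _ => rfl
  | x :: t, hnd => by
    have hxt : x ∉ t := (List.nodup_cons.mp hnd).1
    have hndt : t.Nodup := (List.nodup_cons.mp hnd).2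
    by_cases hc : c x = true
    · have hcx : (!(c x)) = false := by simp [hc]
      rw [List.filter_cons_of_pos hc, List.filter_cons_of_neg (by simp [hcx]), List.foldl_cons]
      have hrm : (PySem.List.remove? (x :: t) x).getD (x :: t) = t := by
        rw [PySem.List.remove?_cons_self]; rfl
      rw [hrm, foldl_remove_filter c t hndt]
    · have hcx : c x = false := by revert hc; cases c x <;> simp
      rw [List.filter_cons_of_neg (by simp [hcx]), List.filter_cons_of_pos (by simp [hcx])]
      rw [foldl_remove_cons (t.filter c)
          (fun y hy h => hxt (by rw [← h]; exact (List.mem_filter.mp hy).1))]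
      rw [foldl_remove_filter c t hndt]

-- B's fold equals Ksel (generalised over the start index)
theorem alt_fold_eq (mp : List PVP) :
    ∀ (l : List PVP) (s : Nat) (acc : List PVP),
    (PySem.List.enumerate l (s : Int)).foldl
      (fun out ip =>
        if mp.any (fun q => pyLeAlt ip.2 q && !(pyLeAlt q ip.2)) then out
        else if (PySem.List.slice mp none (some ip.1)).any
                  (fun q => pyLeAlt ip.2 q && pyLeAlt q ip.2) then out
        else out ++ [ip.2]) acc
    = acc ++ (l.zipIdx s).filterMap (fun pi => if keepCond mp pi.2 pi.1 then some pi.1 else none)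
  | [], s, acc => by simp [PySem.List.enumerate]
  | p :: t, s, acc => by
    rw [PySem.List.enumerate_cons, List.zipIdx_cons]
    simp only [List.foldl_cons, List.filterMap_cons]
    have hcast : ((s : Int) + 1) = ((s + 1 : Nat) : Int) := by push_cast; ring
    rw [hcast, alt_fold_eq mp t (s + 1)]
    rw [PySem.List.slice_to_natCast mp s]
    by_cases h1 : mp.any (fun q => pyLeAlt p q && !(pyLeAlt q p)) = true
    · simp [keepCond, h1]
    · by_cases h2 : (mp.take s).any (fun q => pyLeAlt p q && pyLeAlt q p) = true
      · simp [keepCond, h1, h2]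
      · simp [keepCond, h1, h2]

theorem alt_eq_Ksel (mp : List PVP) : reduce_maximal_pairs_alt mp = Ksel mp := by
  have := alt_fold_eq mp mp 0 []
  simpa [reduce_maximal_pairs_alt, Ksel, PySem.List.enumerate] using this

-- keepCond bookkeeping for a snoc
theorem keepCond_of_append {l : List PVP} {p x : PVP} {i : Nat} (hib : i ≤ l.length)
    (hc : keepCond (l ++ [p]) i x = true) : keepCond l i x = true := by
  simp only [keepCond, List.take_append_of_le_length hib, Bool.and_eq_true, Bool.not_eq_true',
    List.any_eq_false] at hc ⊢
  exact ⟨fun q hq => hc.1 q (List.mem_append_left _ hq), hc.2⟩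

theorem keepCond_append {l : List PVP} {p x : PVP} {i : Nat} (hib : i ≤ l.length)
    (hc : keepCond l i x = true) (hp : (pyLeAlt x p && !(pyLeAlt p x)) = false) :
    keepCond (l ++ [p]) i x = true := by
  simp only [keepCond, List.take_append_of_le_length hib, Bool.and_eq_true, Bool.not_eq_true',
    List.any_eq_false] at hc ⊢
  refine ⟨fun q hq => ?_, hc.2⟩
  rcases List.mem_append.mp hq with h | h
  · exact hc.1 q h
  · rw [List.mem_singleton] at h; subst h
    rintro ⟨ha, hb⟩; rw [ha, hb] at hp; simp at hp

theorem mem_Ksel_of_keep {l : List PVP} {x : PVP} {i : Nat}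
    (hmem : (x, i) ∈ l.zipIdx) (hc : keepCond l i x = true) : x ∈ Ksel l := by
  simp only [Ksel, List.mem_filterMap]
  exact ⟨(x, i), hmem, by rw [if_pos hc]⟩

-- Ksel over a snoc: the two cases
theorem Ksel_append_dominated {l : List PVP} {p : PVP}
    (hdom : ∃ k ∈ Ksel l, pyLeAlt p k = true) :
    Ksel (l ++ [p]) = Ksel l := by
  obtain ⟨k, hk, hpk⟩ := hdom
  have hkl := mem_Ksel hk
  unfold Ksel
  rw [List.zipIdx_append, List.filterMap_append]
  have hkc : keepCond (l ++ [p]) l.length p = false := by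
    have htake : (l ++ [p]).take l.length = l := by
      rw [List.take_append_of_le_length (le_refl _), List.take_length]
    simp only [keepCond, htake, Bool.and_eq_false_iff, Bool.not_eq_false', List.any_eq_true]
    by_cases hkp : pyLeAlt k p = true
    · right; exact ⟨k, hkl.1, by simp [hpk, hkp]⟩
    · left
      exact ⟨k, List.mem_append_left _ hkl.1, by simp [hpk, Bool.eq_false_iff.mpr hkp]⟩
  have hlast : (([p].zipIdx (0 + l.length)).filterMap
      (fun pi => if keepCond (l ++ [p]) pi.2 pi.1 then some pi.1 else none)) = [] := by
    simp only [List.zipIdx_cons, List.zipIdx_nil, List.filterMap_cons, List.filterMap_nil,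
      Nat.zero_add]
    rw [if_neg (by simp [hkc])]
  rw [hlast, List.append_nil]
  refine List.filterMap_congr ?_
  rintro ⟨x, i⟩ hmem
  obtain ⟨_, hlt, hx⟩ := List.mem_zipIdx hmem
  have hib : i ≤ l.length := by omega
  by_cases hc : keepCond l i x = true
  · have hxK : x ∈ Ksel l := mem_Ksel_of_keep hmem hc
    have hnsp : (pyLeAlt x p && !(pyLeAlt p x)) = false := by
      by_cases hxp : pyLeAlt x p = true
      · have hxk : pyLeAlt x k = true := pyLe_trans hxp hpk
        by_cases hkx : pyLeAlt k x = true
        · have hpx : pyLeAlt p x = true := pyLe_trans hpk hkx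
          simp [hpx]
        · exact absurd ⟨hxk, Bool.eq_false_iff.mpr hkx⟩ ((mem_Ksel hxK).2 k hkl.1)
      · simp [Bool.eq_false_iff.mpr hxp]
    rw [if_pos hc, if_pos (keepCond_append hib hc hnsp)]
  · have hc2 : ¬ keepCond (l ++ [p]) i x = true := fun h => hc (keepCond_of_append hib h)
    rw [if_neg hc, if_neg hc2]

theorem Ksel_append_new {l : List PVP} {p : PVP}
    (hnew : ∀ k ∈ Ksel l, pyLeAlt p k = false)
    (hcov : ∀ x ∈ l, ∃ k ∈ Ksel l, pyLeAlt x k = true) :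
    Ksel (l ++ [p]) = (Ksel l).filter (fun r => !(pyLeAlt r p)) ++ [p] := by
  -- p is below no element of l at all
  have hplF : ∀ q ∈ l, pyLeAlt p q = false := by
    intro q hq
    by_cases h : pyLeAlt p q = true
    · obtain ⟨k, hk, hqk⟩ := hcov q hq
      have h2 := pyLe_trans h hqk
      rw [hnew k hk] at h2; exact absurd h2 (by simp)
    · exact Bool.eq_false_iff.mpr h
  unfold Ksel
  rw [List.zipIdx_append, List.filterMap_append]
  have hkc : keepCond (l ++ [p]) l.length p = true := by
    have htake : (l ++ [p]).take l.length = l := by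
      rw [List.take_append_of_le_length (le_refl _), List.take_length]
    simp only [keepCond, htake, Bool.and_eq_true, Bool.not_eq_true', List.any_eq_false]
    constructor
    · intro q hq
      rcases List.mem_append.mp hq with hql | hqp
      · intro h; rw [hplF q hql] at h; simp at h
      · rw [List.mem_singleton] at hqp; subst hqp
        simp [pyLe_refl]
    · intro q hq
      intro h; rw [hplF q hq] at h; simp at h
  have hlast : (([p].zipIdx (0 + l.length)).filterMap
      (fun pi => if keepCond (l ++ [p]) pi.2 pi.1 then some pi.1 else none)) = [p] := by
    simp only [List.zipIdx_cons, List.zipIdx_nil, List.filterMap_cons, List.filterMap_nil,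
      Nat.zero_add]
    rw [if_pos hkc]
  rw [hlast]
  congr 1
  rw [List.filter_filterMap]
  refine List.filterMap_congr ?_
  rintro ⟨x, i⟩ hmem
  obtain ⟨_, hlt, hx⟩ := List.mem_zipIdx hmem
  have hib : i ≤ l.length := by omega
  by_cases hc : keepCond l i x = true
  · have hxK : x ∈ Ksel l := mem_Ksel_of_keep hmem hc
    have hpxF : pyLeAlt p x = false := hnew x hxK
    by_cases hxp : pyLeAlt x p = true
    · -- x is strictly dominated by p now
      have hfail : ¬ keepCond (l ++ [p]) i x = true := by
        intro hkt
        have htake : (l ++ [p]).take i = l.take i := List.take_append_of_le_length hib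
        simp only [keepCond, Bool.and_eq_true, Bool.not_eq_true', List.any_eq_false] at hkt
        have := hkt.1 p (List.mem_append_right _ (List.mem_singleton.mpr rfl))
        simp [hxp, hpxF] at this
      rw [if_neg hfail, if_pos hc]
      simp [Option.filter, hxp]
    · have hok : keepCond (l ++ [p]) i x = true :=
        keepCond_append hib hc (by simp [Bool.eq_false_iff.mpr hxp])
      rw [if_pos hok, if_pos hc]
      simp [Option.filter, Bool.eq_false_iff.mpr hxp]
  · have hc2 : ¬ keepCond (l ++ [p]) i x = true := fun h => hc (keepCond_of_append hib h)
    rw [if_neg hc, if_neg hc2]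
    rfl

-- stepA on the kept list, the two cases
theorem stepA_dominated {acc : List PVP} {p : PVP} (h : ∃ k ∈ acc, pyLeAlt p k = true) :
    stepA acc p = acc := by
  obtain ⟨k, hk, hpk⟩ := h
  have : 0 < (acc.filter (fun r => pySubA p.1 r.1 && pySubA p.2 r.2)).length := by
    have : k ∈ acc.filter (fun r => pySubA p.1 r.1 && pySubA p.2 r.2) := by
      rw [List.mem_filter]; exact ⟨hk, by rw [pySub_eq_le]; exact hpk⟩
    exact List.length_pos_of_mem this
  simp [stepA, this]

theorem stepA_new {acc : List PVP} {p : PVP} (hnd : acc.Nodup)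
    (h : ∀ k ∈ acc, pyLeAlt p k = false) :
    stepA acc p = acc.filter (fun r => !(pyLeAlt r p)) ++ [p] := by
  have h1 : ¬ (0 < (acc.filter (fun r => pySubA p.1 r.1 && pySubA p.2 r.2)).length) := by
    simp only [not_lt, Nat.le_zero, List.length_eq_zero_iff, List.filter_eq_nil_iff]
    intro a ha
    rw [pySub_eq_le, h a ha]; simp
  by_cases h2 : 0 < (acc.filter (fun r => pySubA r.1 p.1 && pySubA r.2 p.2)).length
  · simp only [stepA, h1, if_false, h2, if_true]
    have hfeq : (acc.filter (fun r => pySubA r.1 p.1 && pySubA r.2 p.2))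
        = acc.filter (fun r => pyLeAlt r p) := by
      refine List.filter_congr ?_; intro a _; rw [pySub_eq_le]
    rw [hfeq, foldl_remove_filter _ acc hnd]
  · simp only [stepA, h1, if_false, h2, if_false]
    congr 1
    symm
    rw [List.filter_eq_self]
    intro a ha
    simp only [not_lt, Nat.le_zero, List.length_eq_zero_iff, List.filter_eq_nil_iff] at h2
    have := h2 a ha
    rw [pySub_eq_le] at this
    simp only [Bool.not_eq_true] at this
    simp [this]

-- the main invariant, by induction from the right
theorem goodInv : ∀ l : List PVP, GoodInv l := by
  intro l
  induction l using List.reverseRecOn with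
  | nil =>
    refine ⟨rfl, by simp, by simp [Ksel]⟩
  | append_singleton l p ih =>
    obtain ⟨hA, hcov, hpw⟩ := ih
    by_cases hdom : ∃ k ∈ Ksel l, pyLeAlt p k = true
    · -- p is dominated by a kept pair: nothing changes
      have hK := Ksel_append_dominated hdom
      refine ⟨?_, ?_, ?_⟩
      · rw [List.foldl_append, hA, List.foldl_cons, List.foldl_nil,
          stepA_dominated hdom, hK]
      · intro x hx
        rw [hK]
        rcases List.mem_append.mp hx with hxl | hxp
        · exact hcov x hxl
        · simp only [List.mem_singleton] at hxp; subst hxp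
          exact hdom
      · rw [hK]; exact hpw
    · have hnew : ∀ k ∈ Ksel l, pyLeAlt p k = false := by
        intro k hk
        by_cases h : pyLeAlt p k = true
        · exact absurd ⟨k, hk, h⟩ hdom
        · exact Bool.eq_false_iff.mpr h
      have hK := Ksel_append_new hnew hcov
      refine ⟨?_, ?_, ?_⟩
      · rw [List.foldl_append, hA, List.foldl_cons, List.foldl_nil,
          stepA_new (nodup_of_pairwise hpw) hnew, hK]
      · intro x hx
        rw [hK]
        rcases List.mem_append.mp hx with hxl | hxp
        · obtain ⟨k, hk, hxk⟩ := hcov x hxl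
          by_cases hkp : pyLeAlt k p = true
          · exact ⟨p, List.mem_append_right _ (List.mem_singleton.mpr rfl), pyLe_trans hxk hkp⟩
          · exact ⟨k, List.mem_append_left _
              (List.mem_filter.mpr ⟨hk, by simp [Bool.eq_false_iff.mpr hkp]⟩), hxk⟩
        · simp only [List.mem_singleton] at hxp
          exact ⟨p, List.mem_append_right _ (List.mem_singleton.mpr rfl),
            by rw [hxp]; exact pyLe_refl p⟩
      · rw [hK]
        rw [List.pairwise_append]
        refine ⟨hpw.sublist List.filter_sublist, List.pairwise_singleton _ _, ?_⟩
        intro a ha b hb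
        simp only [List.mem_singleton] at hb; subst hb
        have := (List.mem_filter.mp ha).2
        simp only [Bool.not_eq_true'] at this
        rintro ⟨hab, _⟩
        rw [this] at hab; exact absurd hab (by simp)

-- ===== VERDICT (by name: the statement is the Claim_ definition above) =====
theorem reduce_maximal_pairs_spec : Claim_equal_reduce_maximal_pairs := by
  intro mp _
  unfold Spec_reduce_maximal_pairs reduce_maximal_pairs
  rw [alt_eq_Ksel]
  exact (goodInv mp).1
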